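-- pv_equiv track=rewrite | github.com/pypi-data/pypi-mirror-398 | packages/ytsage/ytsage-4.9.7-py3-none-any.whl/ytsage/src/gui/ytsage_gui_dialogs/ytsage_dialogs_selection.py | _condense_indices
-- ===== SOURCE A (Python) =====
-- def _condense_indices(indices: list[int]) -> str:
--     """Condenses a list of 1-based indices into a yt-dlp selection string."""
--     if not indices:
--         return ""
--
--     # Remove duplicates and sort in one step
--     indices = sorted(set(indices))
--
--     ranges = []
--     start = end = indices[0]
--
--     for num in indices[1:]:
--         if num == end + 1:
--             end = num
--         else:
--             ranges.append(f"{start}-{end}" if start != end else str(start))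
--             start = end = num
--
--     # Append the last range
--     ranges.append(f"{start}-{end}" if start != end else str(start))
--
--     return ",".join(ranges)
-- ===== SOURCE B (Python) =====
-- def _condense_indices(indices: list[int]) -> str:
--     """Condenses a list of 1-based indices into a yt-dlp selection string."""
--     if not indices:
--         return ""
--     s = set(indices)
--     # v starts a run iff v-1 is absent; v ends a run iff v+1 is absent.
--     starts = sorted(v for v in s if v - 1 not in s)
--     ends = sorted(v for v in s if v + 1 not in s)
--     return ",".join(str(a) if a == b else f"{a}-{b}" for a, b in zip(starts, ends))
-- ===== Notes on version B (the rewrite author's own statement) =====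
-- stated objective: alternative
-- what changed: Replaces the sorted-order adjacency scan with start/end bookkeeping by set-membership boundary detection: a value is a run start iff value-1 is not in the set and a run end iff value+1 is not in the set; the sorted starts and sorted ends are zipped and formatted, with no neighbour comparison over the sorted sequence.
import Mathlib
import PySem

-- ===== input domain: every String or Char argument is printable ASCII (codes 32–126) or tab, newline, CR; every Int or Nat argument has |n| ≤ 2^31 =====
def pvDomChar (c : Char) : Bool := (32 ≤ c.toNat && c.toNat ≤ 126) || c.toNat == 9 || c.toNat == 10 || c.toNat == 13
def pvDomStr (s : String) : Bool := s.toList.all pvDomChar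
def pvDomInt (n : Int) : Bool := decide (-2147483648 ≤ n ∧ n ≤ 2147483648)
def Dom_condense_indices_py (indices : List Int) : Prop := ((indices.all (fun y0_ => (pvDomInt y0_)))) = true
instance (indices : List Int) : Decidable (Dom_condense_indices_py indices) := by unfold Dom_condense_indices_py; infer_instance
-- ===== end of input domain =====

-- B replaces A's sorted-order adjacency scan by set-membership boundary detection (v starts a run iff v-1 ∉ set, ends one iff v+1 ∉ set), zipping sorted starts with sorted ends (alternative; same cost).

-- ===== PORT A =====
-- f"{start}-{end}" if start != end else str(start)
def fmtA (st en : Int) : String :=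
  if st ≠ en then PySem.Int.toStr st ++ "-" ++ PySem.Int.toStr en else PySem.Int.toStr st

def condense_indices_py (indices : List Int) : String :=
  if indices = [] then ""
  else
    match PySem.List.sorted (PySem.Set.ofList indices) (fun x => x) false with
    | [] => ""  -- unreachable (sorted set of a nonempty list is nonempty); guard for totality
    | first :: rest =>
      let fin := rest.foldl
        (fun (s : List String × Int × Int) num =>
          if num = s.2.2 + 1 then (s.1, s.2.1, num)
          else (s.1 ++ [fmtA s.2.1 s.2.2], num, num))
        ([], first, first)
      PySem.Str.join "," (fin.1 ++ [fmtA fin.2.1 fin.2.2])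

-- ===== PORT B =====
-- str(a) if a == b else f"{a}-{b}"
def fmtB (a b : Int) : String :=
  if a = b then PySem.Int.toStr a else PySem.Int.toStr a ++ "-" ++ PySem.Int.toStr b

def condense_indices_py_alt (indices : List Int) : String :=
  if indices = [] then ""
  else
    let s : PySem.Set Int := PySem.Set.ofList indices
    -- starts = sorted(v for v in s if v - 1 not in s)
    let starts := PySem.List.sorted (s.filter (fun v => !(PySem.Set.contains s (v - 1)))) (fun x => x) false
    -- ends = sorted(v for v in s if v + 1 not in s)
    let ends := PySem.List.sorted (s.filter (fun v => !(PySem.Set.contains s (v + 1)))) (fun x => x) false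
    PySem.Str.join "," ((starts.zip ends).map (fun p => fmtB p.1 p.2))

-- ===== PRECONDITION & SPEC =====
def Spec_condense_indices_py (indices : List Int) (out : String) : Prop := out = condense_indices_py_alt indices
instance (indices : List Int) (out : String) : Decidable (Spec_condense_indices_py indices out) := by unfold Spec_condense_indices_py; infer_instance

-- ===== CLAIM (what is proved, stated in full; the proofs are below) =====
def Claim_equal_condense_indices_py : Prop := ∀ (indices : List Int), Dom_condense_indices_py indices → Spec_condense_indices_py indices (condense_indices_py indices)

-- ===== LEMMAS AND PROOFS =====

-- run decomposition (start, end) pairs of the sorted sequence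
def runsP (st en : Int) : List Int → List (Int × Int)
  | [] => [(st, en)]
  | n :: t => if n = en + 1 then runsP st n t else (st, en) :: runsP n n t

-- run starts strictly after the first run's start
def gStarts (en : Int) : List Int → List Int
  | [] => []
  | n :: t => if n = en + 1 then gStarts n t else n :: gStarts n t

-- run ends
def kEnds (en : Int) : List Int → List Int
  | [] => [en]
  | n :: t => if n = en + 1 then kEnds n t else en :: kEnds n t

theorem runsP_map_fst (t : List Int) : ∀ st en,
    (runsP st en t).map Prod.fst = st :: gStarts en t := by
  induction t with
  | nil => intro st en; simp [runsP, gStarts]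
  | cons n t ih =>
    intro st en
    simp only [runsP, gStarts]
    by_cases h : n = en + 1 <;> simp [h, ih]

theorem runsP_map_snd (t : List Int) : ∀ st en,
    (runsP st en t).map Prod.snd = kEnds en t := by
  induction t with
  | nil => intro st en; simp [runsP, kEnds]
  | cons n t ih =>
    intro st en
    simp only [runsP, kEnds]
    by_cases h : n = en + 1 <;> simp [h, ih]

-- A's run strings, accumulator-free
def runsA (st en : Int) : List Int → List String
  | [] => [fmtA st en]
  | n :: t => if n = en + 1 then runsA st n t else fmtA st en :: runsA n n t

theorem runsA_eq_map_runsP (t : List Int) : ∀ st en,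
    runsA st en t = (runsP st en t).map (fun p => fmtA p.1 p.2) := by
  induction t with
  | nil => intro st en; simp [runsA, runsP]
  | cons n t ih =>
    intro st en
    simp only [runsA, runsP]
    by_cases h : n = en + 1 <;> simp [h, ih]

def stepA (s : List String × Int × Int) (num : Int) : List String × Int × Int :=
  if num = s.2.2 + 1 then (s.1, s.2.1, num)
  else (s.1 ++ [fmtA s.2.1 s.2.2], num, num)

theorem foldlA_eq_runsA (t : List Int) : ∀ (acc : List String) (st en : Int),
    (t.foldl stepA (acc, st, en)).1
      ++ [fmtA (t.foldl stepA (acc, st, en)).2.1 (t.foldl stepA (acc, st, en)).2.2]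
      = acc ++ runsA st en t := by
  induction t with
  | nil => intro acc st en; simp [runsA]
  | cons n t ih =>
    intro acc st en
    simp only [List.foldl_cons, runsA, stepA]
    by_cases h : n = en + 1
    · simp [h, ih]
    · simp [h, ih]

theorem fmtA_eq_fmtB (a b : Int) : fmtA a b = fmtB a b := by
  unfold fmtA fmtB; split_ifs <;> simp_all

-- membership-boundary characterisation of run starts, on the tail
theorem filter_starts_tail (full : List Int) (t : List Int) : ∀ (en : Int),
    (en :: t).Pairwise (· < ·) →
    (∀ x : Int, en ≤ x → (x ∈ full ↔ x ∈ en :: t)) →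
    t.filter (fun x => !(decide (x - 1 ∈ full))) = gStarts en t := by
  induction t with
  | nil => intro en _ _; simp [gStarts]
  | cons n t ih =>
    intro en hpw hmem
    have hen_n : en < n := (List.pairwise_cons.mp hpw).1 n (by simp)
    have hpw' : (n :: t).Pairwise (· < ·) := (List.pairwise_cons.mp hpw).2
    have hnt : ∀ y ∈ t, n < y := (List.pairwise_cons.mp hpw').1
    have hmem' : ∀ x : Int, n ≤ x → (x ∈ full ↔ x ∈ n :: t) := by
      intro x hx
      rw [hmem x (by omega)]
      simp only [List.mem_cons]
      constructor
      · rintro (h | h)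
        · omega
        · exact h
      · intro h; exact Or.inr h
    have hhead : (n - 1 ∈ full) ↔ n = en + 1 := by
      rw [hmem (n - 1) (by omega)]
      simp only [List.mem_cons]
      constructor
      · rintro (h | h | h)
        · omega
        · omega
        · exact absurd (hnt _ h) (by omega)
      · intro h; left; omega
    rw [List.filter_cons]
    by_cases h : n = en + 1
    · have hin : n - 1 ∈ full := hhead.mpr h
      rw [if_neg (by simp [hin])]
      simp only [gStarts, if_pos h]
      exact ih n hpw' hmem'
    · have hnotin : ¬ (n - 1 ∈ full) := fun hc => h (hhead.mp hc)
      rw [if_pos (by simp [hnotin])]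
      simp only [gStarts, if_neg h]
      exact congrArg (n :: ·) (ih n hpw' hmem')

-- membership-boundary characterisation of run ends
theorem filter_ends (full : List Int) (t : List Int) : ∀ (en : Int),
    (en :: t).Pairwise (· < ·) →
    (∀ x : Int, en ≤ x → (x ∈ full ↔ x ∈ en :: t)) →
    (en :: t).filter (fun x => !(decide (x + 1 ∈ full))) = kEnds en t := by
  induction t with
  | nil =>
    intro en _ hmem
    have hno : ¬ (en + 1 ∈ full) := by
      rw [hmem (en + 1) (by omega)]; simp
    simp [kEnds, hno]
  | cons n t ih =>
    intro en hpw hmem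
    have hen_n : en < n := (List.pairwise_cons.mp hpw).1 n (by simp)
    have hpw' : (n :: t).Pairwise (· < ·) := (List.pairwise_cons.mp hpw).2
    have hnt : ∀ y ∈ t, n < y := (List.pairwise_cons.mp hpw').1
    have hmem' : ∀ x : Int, n ≤ x → (x ∈ full ↔ x ∈ n :: t) := by
      intro x hx
      rw [hmem x (by omega)]
      simp only [List.mem_cons]
      constructor
      · rintro (h | h)
        · omega
        · exact h
      · intro h; exact Or.inr h
    have hhead : (en + 1 ∈ full) ↔ n = en + 1 := by
      rw [hmem (en + 1) (by omega)]
      simp only [List.mem_cons]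
      constructor
      · rintro (h | h | h)
        · omega
        · omega
        · exact absurd (hnt _ h) (by omega)
      · intro h; right; left; omega
    rw [List.filter_cons]
    by_cases h : n = en + 1
    · have hin : en + 1 ∈ full := hhead.mpr h
      rw [if_neg (by simp [hin])]
      simp only [kEnds, if_pos h]
      exact ih n hpw' hmem'
    · have hnotin : ¬ (en + 1 ∈ full) := fun hc => h (hhead.mp hc)
      rw [if_pos (by simp [hnotin])]
      simp only [kEnds, if_neg h]
      exact congrArg (en :: ·) (ih n hpw' hmem')

theorem sorted_set_ne_nil {indices : List Int} (h : indices ≠ []) :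
    PySem.List.sorted (PySem.Set.ofList indices) (fun x => x) false ≠ [] := by
  intro hc
  rw [PySem.List.sorted_eq_nil_iff] at hc
  rcases indices with _ | ⟨x, xs⟩
  · exact h rfl
  · have : x ∈ PySem.Set.ofList (x :: xs) := by
      rw [PySem.Set.mem_ofList]; simp
    simp [hc] at this

-- sorting the set-filtered values = filtering the sorted set (order named by strict increase)
theorem sorted_filter_eq (s : PySem.Set Int) (p : Int → Bool)
    (L : List Int) (hL : PySem.List.sorted s (fun x => x) false = L)
    (hpw : L.Pairwise (· < ·)) :
    PySem.List.sorted (s.filter p) (fun x => x) false = L.filter p := by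
  apply PySem.List.sorted_eq_of_perm_of_pairwise_lt
  · exact (hL ▸ PySem.List.sorted_perm s (fun x => x) false).filter p
  · exact hpw.filter p

-- ===== VERDICT (by name: the statement is the Claim_ definition above) =====
theorem condense_indices_py_spec : Claim_equal_condense_indices_py := by
  intro indices _
  unfold Spec_condense_indices_py condense_indices_py condense_indices_py_alt
  by_cases hnil : indices = []
  · simp [hnil]
  · simp only [if_neg hnil]
    set s : PySem.Set Int := PySem.Set.ofList indices with hs
    have hpwL : (PySem.List.sorted s (fun x => x) false).Pairwise (· < ·) :=
      PySem.List.sorted_ofList_pairwise_lt indices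
    cases hsort : PySem.List.sorted s (fun x => x) false with
    | nil => exact absurd hsort (sorted_set_ne_nil hnil)
    | cons first rest =>
      rw [hsort] at hpwL
      -- membership transfer: x ∈ s ↔ x ∈ first :: rest
      have hmemL : ∀ x : Int, x ∈ s ↔ x ∈ first :: rest := by
        intro x
        rw [← hsort, PySem.List.mem_sorted]
      have hcont : ∀ x : Int, PySem.Set.contains s x = decide (x ∈ first :: rest) := by
        intro x
        by_cases h : x ∈ first :: rest
        · have hct : PySem.Set.contains s x = true :=
            (PySem.Set.contains_iff s x).mpr ((hmemL x).mpr h)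
          simp only [h, decide_true]
          exact hct
        · simp only [h, decide_false]
          by_contra hc
          simp only [Bool.not_eq_false] at hc
          exact h ((hmemL x).mp ((PySem.Set.contains_iff s x).mp hc))
      -- B's two filtered-sorted lists, rewritten over the sorted list L = first :: rest
      have hstarts : PySem.List.sorted (s.filter (fun v => !(PySem.Set.contains s (v - 1)))) (fun x => x) false
          = (first :: rest).filter (fun x => !(decide (x - 1 ∈ first :: rest))) := by
        rw [sorted_filter_eq s _ _ hsort hpwL]
        apply List.filter_congr
        intro x _
        rw [hcont]
      have hends : PySem.List.sorted (s.filter (fun v => !(PySem.Set.contains s (v + 1)))) (fun x => x) false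
          = (first :: rest).filter (fun x => !(decide (x + 1 ∈ first :: rest))) := by
        rw [sorted_filter_eq s _ _ hsort hpwL]
        apply List.filter_congr
        intro x _
        rw [hcont]
      have hfirst_lt : ∀ y ∈ rest, first < y := (List.pairwise_cons.mp hpwL).1
      -- starts filter = first :: gStarts
      have hfself : ((first :: rest).filter (fun x => !(decide (x - 1 ∈ first :: rest))))
          = first :: gStarts first rest := by
        have hno : ¬ (first - 1 ∈ first :: rest) := by
          simp only [List.mem_cons]
          rintro (h | h)
          · omega
          · exact absurd (hfirst_lt _ h) (by omega)
        rw [List.filter_cons, if_pos (by simp [hno])]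
        congr 1
        exact filter_starts_tail (first :: rest) rest first hpwL (fun x _ => Iff.rfl)
      have hkself : ((first :: rest).filter (fun x => !(decide (x + 1 ∈ first :: rest))))
          = kEnds first rest :=
        filter_ends (first :: rest) rest first hpwL (fun x _ => Iff.rfl)
      -- assemble
      dsimp only
      congr 1
      rw [show (fun (s : List String × Int × Int) num =>
            if num = s.2.2 + 1 then (s.1, s.2.1, num)
            else (s.1 ++ [fmtA s.2.1 s.2.2], num, num)) = stepA from rfl]
      rw [foldlA_eq_runsA rest [] first first]
      rw [hstarts, hends, hfself, hkself]
      rw [← runsP_map_fst rest first first, ← runsP_map_snd rest first first]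
      rw [List.zip_map']
      simp only [List.nil_append, runsA_eq_map_runsP, List.map_map]
      apply List.map_congr_left
      intro p _
      simp [fmtA_eq_fmtB]
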